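-- pv_equiv track=rewrite | github.com/AnonChaisrithong/AnonChaisrithong | project/09 34 เติมเลข.py | pattern6
-- ===== SOURCE A (Python) =====
-- def pattern6(N):
--     l1 = []
--     for i in range(N):
--         c = i + 1
--         l2 = []
--         for k in range(i):
--             l2.append(0)
--         for k in range(N - i):
--             l2.append(c)
--             c += N + 2
--         l1.append(l2)
--     return l1
-- ===== SOURCE B (Python) =====
-- def pattern6(N):
--     # each entry computed directly from its coordinates (i, j)
--     return [[0 if j < i else (i + 1) + (j - i) * (N + 2) for j in range(N)]
--             for i in range(N)]
-- ===== Notes on version B (the rewrite author's own statement) =====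
-- stated objective: simpler
-- what changed: Replaced A's running accumulator c and the two segmented fill loops per row with a single full-width comprehension computing each entry in closed form from its coordinates (i, j).
import Mathlib
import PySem

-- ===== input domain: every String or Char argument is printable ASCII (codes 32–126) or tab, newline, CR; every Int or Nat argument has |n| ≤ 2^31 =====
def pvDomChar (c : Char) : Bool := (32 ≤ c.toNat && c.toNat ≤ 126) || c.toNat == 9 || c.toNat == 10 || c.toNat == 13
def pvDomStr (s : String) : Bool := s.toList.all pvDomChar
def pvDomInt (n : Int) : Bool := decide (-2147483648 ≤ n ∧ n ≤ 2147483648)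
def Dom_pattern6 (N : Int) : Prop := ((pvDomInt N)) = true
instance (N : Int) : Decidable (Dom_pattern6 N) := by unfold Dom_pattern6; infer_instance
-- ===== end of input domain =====

-- B replaces A's running accumulator and two segmented per-row fill loops with a
-- single full-width pass computing each entry in closed form from (i, j) (objective: simpler).

-- ===== PORT A =====
def pattern6 (N : Int) : List (List Int) :=
  (PySem.List.pyRange 0 N 1).foldl (fun l1 i =>
    let c := i + 1
    let l2 : List Int := []
    let l2 := (PySem.List.pyRange 0 i 1).foldl (fun l2 _ => l2 ++ [0]) l2
    let p := (PySem.List.pyRange 0 (N - i) 1).foldl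
      (fun (p : List Int × Int) _ => (p.1 ++ [p.2], p.2 + (N + 2))) (l2, c)
    l1 ++ [p.1]) []

-- ===== PORT B =====
def pattern6_alt (N : Int) : List (List Int) :=
  (PySem.List.pyRange 0 N 1).map (fun i =>
    (PySem.List.pyRange 0 N 1).map (fun j =>
      if j < i then 0 else (i + 1) + (j - i) * (N + 2)))

-- ===== PRECONDITION & SPEC =====
def Spec_pattern6 (N : Int) (out : List (List Int)) : Prop := out = pattern6_alt N
instance (N : Int) (out : List (List Int)) : Decidable (Spec_pattern6 N out) := by unfold Spec_pattern6; infer_instance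

-- ===== CLAIM (what is proved, stated in full; the proofs are below) =====
def Claim_equal_pattern6 : Prop := ∀ (N : Int), Dom_pattern6 N → Spec_pattern6 N (pattern6 N)

-- ===== LEMMAS AND PROOFS =====

-- the zero-fill loop only uses the list's length
theorem pv_zeros_loop (xs : List Int) (l0 : List Int) :
    xs.foldl (fun l _ => l ++ [(0 : Int)]) l0 = l0 ++ List.replicate xs.length 0 := by
  induction xs generalizing l0 with
  | nil => simp
  | cons x xs ih =>
      simp [List.foldl, ih, List.replicate_succ]

-- the arithmetic-progression loop: appends c, c+d, c+2d, …
theorem pv_ap_loop (xs : List Int) (d : Int) (l0 : List Int) (c : Int) :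
    xs.foldl (fun (p : List Int × Int) _ => (p.1 ++ [p.2], p.2 + d)) (l0, c) =
      (l0 ++ (List.range xs.length).map (fun k : Nat => c + (k : Int) * d),
       c + (xs.length : Int) * d) := by
  induction xs generalizing l0 c with
  | nil => simp
  | cons x xs ih =>
      simp only [List.foldl_cons, ih, List.length_cons, Prod.mk.injEq]
      refine ⟨?_, by push_cast; ring⟩
      rw [List.range_succ_eq_map]
      simp only [List.map_cons, List.map_map, List.append_assoc, List.singleton_append]
      congr 2
      · push_cast; ring
      · apply List.map_congr_left
        intro k _
        simp only [Function.comp_apply]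
        push_cast
        ring

-- folding row-append is map
theorem pv_rows_loop (xs : List Int) (f : Int → List Int) (acc : List (List Int)) :
    xs.foldl (fun l1 i => l1 ++ [f i]) acc = acc ++ xs.map f := by
  induction xs generalizing acc with
  | nil => simp
  | cons x xs ih => simp [List.foldl, ih]

-- one row of A in closed form
theorem pv_rowA (N i : Int) (_h0 : 0 ≤ i) :
    (List.replicate (PySem.List.pyRange 0 i 1).length (0 : Int)) ++
      (List.range (PySem.List.pyRange 0 (N - i) 1).length).map
        (fun k : Nat => (i + 1) + (k : Int) * (N + 2)) =
    (PySem.List.pyRange 0 i 1).map (fun _ => (0 : Int)) ++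
      (PySem.List.pyRange i N 1).map (fun j => (i + 1) + (j - i) * (N + 2)) := by
  congr 1
  · rw [List.map_const']
  · rw [PySem.List.length_pyRange_one, PySem.List.pyRange_one i N, List.map_map]
    simp only [sub_zero]
    apply List.map_congr_left
    intro k _
    simp only [Function.comp_apply]
    ring

theorem pattern6_eq (N : Int) : pattern6 N = pattern6_alt N := by
  unfold pattern6 pattern6_alt
  rw [pv_rows_loop]
  simp only [List.nil_append]
  apply List.map_congr_left
  intro i hi
  rw [PySem.List.mem_pyRange_one] at hi
  rw [pv_zeros_loop, pv_ap_loop]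
  simp only [List.nil_append]
  rw [pv_rowA N i hi.1]
  rw [PySem.List.pyRange_one_append 0 i N hi.1 (le_of_lt hi.2), List.map_append]
  congr 1
  · apply List.map_congr_left
    intro j hj
    rw [PySem.List.mem_pyRange_one] at hj
    simp [hj.2]
  · apply List.map_congr_left
    intro j hj
    rw [PySem.List.mem_pyRange_one] at hj
    rw [if_neg (by omega)]

-- ===== VERDICT (by name: the statement is the Claim_ definition above) =====
theorem pattern6_spec : Claim_equal_pattern6 := by
  intro N _
  exact pattern6_eq N
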